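-- pv_equiv track=rewrite | github.com/S-Christensen/cartographersStudy | scoringCards.py | greengoldPlains
-- ===== SOURCE A (Python) =====
-- def dfs(grid, row, col, visited, terrain_type):
--     stack = [(row, col)]
--     cluster = []
--
--     while stack:
--         r, c = stack.pop()
--         if (r, c) not in visited and grid[r][c] == terrain_type:
--             visited.add((r, c))
--             cluster.append((r, c))
--             for dr, dc in [(1, 0), (-1, 0), (0, 1), (0, -1)]:
--                 nr, nc = r + dr, c + dc
--                 if 0 <= nr < len(grid) and 0 <= nc < len(grid[0]):
--                     stack.append((nr, nc))
--     return cluster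
--
-- def greengoldPlains(grid):
--     visited = set()
--     clusters = []
--
--     terrain_types = {"forest", "farm", "water", "monster", "mountain"}
--
--     for r in range(len(grid)):
--         for c in range(len(grid[0])):
--             if (r, c) not in visited and grid[r][c] == "village":
--                 cluster = dfs(grid, r, c, visited, "village")
--                 clusters.append(cluster)
--
--     count = 0
--     for cluster in clusters:
--         adjacent_types = set()
--         for r, c in cluster:
--             for dr, dc in [(1,0), (-1,0), (0,1), (0,-1)]:
--                 nr, nc = r + dr, c + dc
--                 if 0 <= nr < len(grid) and 0 <= nc < len(grid[0]):
--                     t = grid[nr][nc]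
--                     if t in terrain_types:
--                         adjacent_types.add(t)
--         if len(adjacent_types) >= 3:
--             count += 1
--
--     return count * 3
-- ===== SOURCE B (Python) =====
-- def greengoldPlains(grid):
--     # Connected-component labelling ("union-find by relabelling") instead of
--     # per-seed DFS: one row-major pass assigns each village cell an integer
--     # label from its up/left neighbours (merging classes by rewriting the
--     # smaller-labelled one over the table), then the clusters are read off by
--     # grouping cells per final label.
--     terrain_types = {"forest", "farm", "water", "monster", "mountain"}
--     h = len(grid)
--     w = len(grid[0]) if h else 0
--     label = {}
--     fresh = 0
--     for r in range(h):
--         for c in range(w):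
--             if grid[r][c] != "village":
--                 continue
--             ns = [label[q] for q in ((r - 1, c), (r, c - 1)) if q in label]
--             if not ns:
--                 label[(r, c)] = fresh
--                 fresh += 1
--             else:
--                 keep = min(ns)
--                 label[(r, c)] = keep
--                 for q in label:
--                     if label[q] in ns:
--                         label[q] = keep
--     labs = []
--     for q in label:
--         if label[q] not in labs:
--             labs.append(label[q])
--     count = 0
--     for l in labs:
--         types = set()
--         for q in label:
--             if label[q] != l:
--                 continue
--             r, c = q
--             for nr, nc in ((r - 1, c), (r + 1, c), (r, c - 1), (r, c + 1)):
--                 if 0 <= nr < h and 0 <= nc < w: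
--                     t = grid[nr][nc]
--                     if t in terrain_types:
--                         types.add(t)
--         if len(types) >= 3:
--             count += 1
--     return 3 * count
-- ===== Notes on version B (the rewrite author's own statement) =====
-- stated objective: alternative
-- what changed: Replaces the per-seed stack-DFS flood fill (plus a second per-cluster scan) by a single row-major connected-component-labelling pass: each village cell gets an integer label from its up/left neighbours, classes are merged union-find-style by rewriting the losing label over the table, and clusters are then read off by grouping cells per final label.
import Mathlib
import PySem

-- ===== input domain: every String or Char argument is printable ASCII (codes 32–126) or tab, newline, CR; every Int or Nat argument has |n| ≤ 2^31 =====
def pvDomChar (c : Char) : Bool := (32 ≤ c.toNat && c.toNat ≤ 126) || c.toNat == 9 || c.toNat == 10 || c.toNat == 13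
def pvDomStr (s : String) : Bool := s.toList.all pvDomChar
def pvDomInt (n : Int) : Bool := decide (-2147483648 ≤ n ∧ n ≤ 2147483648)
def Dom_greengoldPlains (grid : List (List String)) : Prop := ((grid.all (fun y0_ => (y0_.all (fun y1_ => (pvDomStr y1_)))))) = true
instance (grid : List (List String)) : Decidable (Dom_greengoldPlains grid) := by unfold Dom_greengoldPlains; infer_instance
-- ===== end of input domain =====

-- B replaces A's per-seed stack DFS by a one-pass union-find-style connected-component
-- labelling (merge by relabelling); alternative algorithm, equal return value (A's Python
-- mutates its local `visited` set only; no caller-visible mutation).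
-- ===== PORT A =====
-- grid[r][c]; exact wherever Python's double indexing does not raise (under Pre_ every
-- use below is in range, so the `getD` defaults are never the returned cell of a real access)
def pvLookup (grid : List (List String)) (r c : Int) : String :=
  (PySem.List.pyGet? ((PySem.List.pyGet? grid r).getD []) c).getD ""

-- `0 <= nr < len(grid) and 0 <= nc < len(grid[0])` (both Pythons use exactly this test)
def pvInB (grid : List (List String)) (p : Int × Int) : Bool :=
  decide (0 ≤ p.1 ∧ p.1 < (grid.length : Int) ∧ 0 ≤ p.2 ∧ p.2 < ((grid.headD []).length : Int))

-- the row-major scan order `for r in range(len(grid)): for c in range(len(grid[0])):`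
-- (both Pythons run exactly this nested loop)
def pvCells (grid : List (List String)) : List (Int × Int) :=
  (List.range grid.length).flatMap
    (fun (r : Nat) => (List.range (grid.headD []).length).map (fun (c : Nat) => ((r : Int), (c : Int))))

-- termination measure helpers for the while-loop of A's dfs
def pvUnvis (grid : List (List String)) (visited : PySem.Set (Int × Int)) : Nat :=
  (pvCells grid).countP (fun q => !(PySem.Set.contains visited q))

def pvStackW (grid : List (List String)) (stack : List (Int × Int)) : Nat :=
  (stack.map (fun q => if pvInB grid q then 1 else 5)).sum

theorem pvCells_mem (grid : List (List String)) (p : Int × Int) :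
    p ∈ pvCells grid ↔ pvInB grid p = true := by
  constructor
  · intro h
    rw [pvCells] at h
    obtain ⟨r, hr, hmem⟩ := List.mem_flatMap.1 h
    obtain ⟨c, hc, heq⟩ := List.mem_map.1 hmem
    rw [List.mem_range] at hr hc
    rw [pvInB, decide_eq_true_eq]
    rw [← heq]
    refine ⟨by omega, by omega, by omega, by omega⟩
  · intro h
    rw [pvInB, decide_eq_true_eq] at h
    obtain ⟨h1, h2, h3, h4⟩ := h
    rw [pvCells]
    refine List.mem_flatMap.2 ⟨p.1.toNat, List.mem_range.2 (by omega),
      List.mem_map.2 ⟨p.2.toNat, List.mem_range.2 (by omega), ?_⟩⟩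
    rw [Prod.ext_iff]
    constructor <;> simp <;> omega

theorem pv_countP_lt {α : Type} (l : List α) (P P' : α → Bool) (x : α)
    (hmono : ∀ a, P' a = true → P a = true) (hx : x ∈ l) (hP : P x = true) (hP' : P' x = false) :
    l.countP P' < l.countP P := by
  induction l with
  | nil => simp at hx
  | cons a l ih =>
    rcases List.mem_cons.1 hx with rfl | hx
    · have := List.countP_mono_left (l := l) (p := P') (q := P) (fun a _ h => hmono a h)
      simp only [List.countP_cons, hP, hP']
      simp only [Bool.false_eq_true, if_false, if_true]
      omega
    · have := ih hx
      simp only [List.countP_cons]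
      by_cases h : P' a = true
      · simp only [h, hmono a h, if_true]; omega
      · simp only [Bool.not_eq_true] at h
        simp only [h, Bool.false_eq_true, if_false]
        split <;> omega

theorem pv_contains_add {α : Type} [BEq α] [LawfulBEq α] (s : PySem.Set α) (p a : α)
    (h : PySem.Set.contains s a = true) : PySem.Set.contains (PySem.Set.add s p) a = true := by
  rw [PySem.Set.contains_iff] at h ⊢
  rw [PySem.Set.mem_add]
  exact Or.inl h

theorem pv_contains_add_self {α : Type} [BEq α] [LawfulBEq α] (s : PySem.Set α) (p : α) :
    PySem.Set.contains (PySem.Set.add s p) p = true := by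
  rw [PySem.Set.contains_iff, PySem.Set.mem_add]
  exact Or.inr rfl

theorem pvUnvis_add_lt (grid : List (List String)) (visited : PySem.Set (Int × Int))
    (p : Int × Int) (hmem : p ∈ pvCells grid) (hnc : PySem.Set.contains visited p = false) :
    pvUnvis grid (PySem.Set.add visited p) < pvUnvis grid visited := by
  refine pv_countP_lt _ _ _ p ?_ hmem ?_ ?_
  · intro a ha
    rw [Bool.not_eq_true'] at ha ⊢
    by_contra hne
    have hT : PySem.Set.contains visited a = true := by
      cases h : PySem.Set.contains visited a
      · exact absurd h hne
      · rfl
    rw [pv_contains_add visited p a hT] at ha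
    cases ha
  · rw [hnc]; rfl
  · rw [pv_contains_add_self]
    rfl

theorem pvUnvis_add_le (grid : List (List String)) (visited : PySem.Set (Int × Int)) (p : Int × Int) :
    pvUnvis grid (PySem.Set.add visited p) ≤ pvUnvis grid visited := by
  apply List.countP_mono_left
  intro a _ ha
  rw [Bool.not_eq_true'] at ha ⊢
  by_contra hne
  have hT : PySem.Set.contains visited a = true := by
    cases h : PySem.Set.contains visited a
    · exact absurd h hne
    · rfl
  rw [pv_contains_add visited p a hT] at ha
  cases ha

-- A's dfs while-loop.  The Python list used as a stack (append / pop at the END) is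
-- represented with its TOP AS THE HEAD, so `stack.pop()` is the head pattern and the four
-- `stack.append(...)` of one iteration prepend in reverse push order.
def dfsLoop (grid : List (List String)) (terrain : String) (stack : List (Int × Int))
    (visited : PySem.Set (Int × Int)) (cluster : List (Int × Int)) :
    PySem.Set (Int × Int) × List (Int × Int) :=
  match stack with
  | [] => (visited, cluster)
  | p :: rest =>
    if (!(PySem.Set.contains visited p)) && (pvLookup grid p.1 p.2 == terrain) then
      dfsLoop grid terrain
        ((([(p.1, p.2 - 1), (p.1, p.2 + 1), (p.1 - 1, p.2), (p.1 + 1, p.2)] : List (Int × Int)).filter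
            (fun q => pvInB grid q)) ++ rest)
        (PySem.Set.add visited p) (cluster ++ [p])
    else
      dfsLoop grid terrain rest visited cluster
termination_by 5 * pvUnvis grid visited + pvStackW grid stack
decreasing_by
· rename_i hcond
  have hW : pvStackW grid
      ((([(p.1, p.2 - 1), (p.1, p.2 + 1), (p.1 - 1, p.2), (p.1 + 1, p.2)] : List (Int × Int)).filter
          (fun q => pvInB grid q)) ++ rest) ≤ 4 + pvStackW grid rest := by
    simp only [pvStackW, List.map_append, List.sum_append]
    have h1 : (([(p.1, p.2 - 1), (p.1, p.2 + 1), (p.1 - 1, p.2), (p.1 + 1, p.2)] : List (Int × Int)).filter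
        (fun q => pvInB grid q)).map (fun q => if pvInB grid q then 1 else 5) =
        (([(p.1, p.2 - 1), (p.1, p.2 + 1), (p.1 - 1, p.2), (p.1 + 1, p.2)] : List (Int × Int)).filter
        (fun q => pvInB grid q)).map (fun _ => (1 : Nat)) := by
      apply List.map_congr_left
      intro a ha
      have := List.of_mem_filter ha
      simp [this]
    rw [h1, List.map_const']
    have h2 := List.length_filter_le (fun q => pvInB grid q)
      ([(p.1, p.2 - 1), (p.1, p.2 + 1), (p.1 - 1, p.2), (p.1 + 1, p.2)] : List (Int × Int))
    simp only [List.length_cons, List.length_nil] at h2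
    simp only [List.sum_replicate, smul_eq_mul, mul_one]
    omega
  rw [Bool.and_eq_true, Bool.not_eq_true'] at hcond
  obtain ⟨hnc, _⟩ := hcond
  by_cases hin : pvInB grid p = true
  · have hlt := pvUnvis_add_lt grid visited p ((pvCells_mem grid p).2 hin) hnc
    have hw : pvStackW grid (p :: rest) = 1 + pvStackW grid rest := by
      simp [pvStackW, hin]
    omega
  · have hle := pvUnvis_add_le grid visited p
    have hw : pvStackW grid (p :: rest) = 5 + pvStackW grid rest := by
      rw [Bool.not_eq_true] at hin
      simp [pvStackW, hin]
    omega
· have hw : pvStackW grid (p :: rest) = (if pvInB grid p then 1 else 5) + pvStackW grid rest := by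
    simp [pvStackW]
  have h1 : (1 : Nat) ≤ (if pvInB grid p then 1 else 5) := by split <;> omega
  omega

-- the five scoring terrain types (a Python set literal used only for membership tests)
def pvTerrains : List String := ["forest", "farm", "water", "monster", "mountain"]

-- second phase of A: the per-cluster scan collecting adjacent terrain types
def clusterTypes (grid : List (List String)) (cluster : List (Int × Int)) : PySem.Set String :=
  cluster.foldl (fun s p =>
    ([(p.1 + 1, p.2), (p.1 - 1, p.2), (p.1, p.2 + 1), (p.1, p.2 - 1)] : List (Int × Int)).foldl
      (fun s q =>
        if pvInB grid q then
          if pvTerrains.contains (pvLookup grid q.1 q.2) then PySem.Set.add s (pvLookup grid q.1 q.2)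
          else s
        else s) s) PySem.Set.empty

-- first phase of A: the outer scan firing dfs on unvisited village cells
-- (Python's dfs mutates `visited` and returns `cluster`; the port returns both)
def outerA (grid : List (List String)) : PySem.Set (Int × Int) × List (List (Int × Int)) :=
  (pvCells grid).foldl (fun st p =>
    if (!(PySem.Set.contains st.1 p)) && (pvLookup grid p.1 p.2 == "village") then
      let r := dfsLoop grid "village" [p] st.1 []
      (r.1, st.2 ++ [r.2])
    else st) (PySem.Set.empty, [])

def greengoldPlains (grid : List (List String)) : Int :=
  (((outerA grid).2.foldl (fun count cluster =>
      if 3 ≤ (clusterTypes grid cluster).length then count + 1 else count) (0 : Int))) * 3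

-- ===== PORT B =====
-- pass 1 of B: row-major connected-component labelling; `label` maps village cells to an
-- int label, classes are merged by rewriting every occurrence of a beaten label
def bPass1 (grid : List (List String)) : PySem.Dict (Int × Int) Int × Int :=
  (pvCells grid).foldl (fun st p =>
    if pvLookup grid p.1 p.2 ≠ "village" then st
    else
      let ns := ([(p.1 - 1, p.2), (p.1, p.2 - 1)] : List (Int × Int)).filterMap
        (fun q => PySem.Dict.get? st.1 q)
      if ns = [] then (PySem.Dict.insert st.1 p st.2, st.2 + 1)
      else
        let keep := (PySem.List.min? ns (fun x => x)).getD 0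
        let d := PySem.Dict.insert st.1 p keep
        ((PySem.Dict.keys d).foldl
            (fun d q => if PySem.Dict.getD d q 0 ∈ ns then PySem.Dict.insert d q keep else d) d,
          st.2))
    (PySem.Dict.empty, 0)

-- `labs`: the distinct final labels in first-occurrence order
-- (`label[q]` is exact as getD: every iterated q is a key)
def bLabs (label : PySem.Dict (Int × Int) Int) : List Int :=
  (PySem.Dict.keys label).foldl (fun labs q =>
    if PySem.Dict.getD label q 0 ∈ labs then labs else labs ++ [PySem.Dict.getD label q 0]) []

-- pass 2 of B: adjacent terrain types of the class of label `l`
def bTypes (grid : List (List String)) (label : PySem.Dict (Int × Int) Int) (l : Int) :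
    PySem.Set String :=
  (PySem.Dict.keys label).foldl (fun s q =>
    if PySem.Dict.getD label q 0 ≠ l then s
    else
      ([(q.1 - 1, q.2), (q.1 + 1, q.2), (q.1, q.2 - 1), (q.1, q.2 + 1)] : List (Int × Int)).foldl
        (fun s q' =>
          if pvInB grid q' then
            if pvTerrains.contains (pvLookup grid q'.1 q'.2) then
              PySem.Set.add s (pvLookup grid q'.1 q'.2)
            else s
          else s) s) PySem.Set.empty

def greengoldPlains_alt (grid : List (List String)) : Int :=
  3 * ((bLabs (bPass1 grid).1).foldl (fun count l =>
    if 3 ≤ (bTypes grid (bPass1 grid).1 l).length then count + 1 else count) (0 : Int))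

-- ===== PRECONDITION & SPEC =====
-- Pre_ excludes exactly the grids having a row shorter than row 0: on those Python A
-- (and Python B) raises IndexError; on every other input A returns normally.
def Pre_greengoldPlains (grid : List (List String)) : Prop :=
  ∀ row ∈ grid, (grid.headD []).length ≤ row.length

instance (grid : List (List String)) : Decidable (Pre_greengoldPlains grid) := by
  unfold Pre_greengoldPlains; infer_instance

def pvWitness_greengoldPlains : List (List String) :=
  [["village", "farm"], ["water", "monster"]]

def Spec_greengoldPlains (grid : List (List String)) (out : Int) : Prop :=
  out = greengoldPlains_alt grid

instance (grid : List (List String)) (out : Int) : Decidable (Spec_greengoldPlains grid out) := by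
  unfold Spec_greengoldPlains; infer_instance

-- ===== CLAIM (what is proved, stated in full; the proofs are below) =====
def Claim_equal_greengoldPlains : Prop := ∀ (grid : List (List String)),
  Dom_greengoldPlains grid → Pre_greengoldPlains grid →
  Spec_greengoldPlains grid (greengoldPlains grid)

-- ===== LEMMAS AND PROOFS =====

-- ================== abstract layer ==================
def Vill (grid : List (List String)) (p : Int × Int) : Prop :=
  pvInB grid p = true ∧ pvLookup grid p.1 p.2 = "village"

def Nbr (p q : Int × Int) : Prop :=
  q = (p.1 + 1, p.2) ∨ q = (p.1 - 1, p.2) ∨ q = (p.1, p.2 + 1) ∨ q = (p.1, p.2 - 1)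

def Adj (grid : List (List String)) (p q : Int × Int) : Prop :=
  Vill grid p ∧ Vill grid q ∧ Nbr p q

def Conn (grid : List (List String)) : Int × Int → Int × Int → Prop :=
  Relation.ReflTransGen (Adj grid)

theorem nbr_symm (p q : Int × Int) (h : Nbr p q) : Nbr q p := by
  obtain ⟨a, b⟩ := p; obtain ⟨c, d⟩ := q
  simp only [Nbr, Prod.mk.injEq] at h ⊢
  omega

theorem adj_symm (grid : List (List String)) : Symmetric (Adj grid) := by
  intro p q ⟨h1, h2, h3⟩
  exact ⟨h2, h1, nbr_symm p q h3⟩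

theorem conn_symm (grid : List (List String)) {p q : Int × Int} (h : Conn grid p q) :
    Conn grid q p :=
  Relation.ReflTransGen.symmetric (adj_symm grid) h

theorem conn_trans (grid : List (List String)) {p q r : Int × Int}
    (h1 : Conn grid p q) (h2 : Conn grid q r) : Conn grid p r :=
  Relation.ReflTransGen.trans h1 h2

-- the step relation of A's dfs: move between adjacent villages, both avoiding X
def StA (grid : List (List String)) (X : List (Int × Int)) (a b : Int × Int) : Prop :=
  Adj grid a b ∧ a ∉ X ∧ b ∉ X

def RchA (grid : List (List String)) (X : List (Int × Int)) : Int × Int → Int × Int → Prop :=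
  Relation.ReflTransGen (StA grid X)

def AddedFrom (grid : List (List String)) (stack X : List (Int × Int)) (q : Int × Int) : Prop :=
  Vill grid q ∧ q ∉ X ∧ ∃ s ∈ stack, RchA grid X s q

theorem rchA_mono_remove (grid : List (List String)) (X : List (Int × Int)) (p : Int × Int)
    {s q : Int × Int} (h : RchA grid (PySem.Set.add X p) s q) : RchA grid X s q := by
  refine Relation.ReflTransGen.mono ?_ h
  rintro a b ⟨hadj, ha, hb⟩
  exact ⟨hadj, fun hm => ha ((PySem.Set.mem_add _ _ _).2 (Or.inl hm)),
    fun hm => hb ((PySem.Set.mem_add _ _ _).2 (Or.inl hm))⟩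

theorem rchA_to_conn (grid : List (List String)) (X : List (Int × Int)) {s q : Int × Int}
    (h : RchA grid X s q) : Conn grid s q :=
  Relation.ReflTransGen.mono (fun _ _ hab => hab.1) h

theorem rchA_start (grid : List (List String)) (X : List (Int × Int)) {s q : Int × Int}
    (h : RchA grid X s q) : q = s ∨ (Vill grid s ∧ s ∉ X) := by
  rcases Relation.ReflTransGen.cases_head h with h1 | ⟨c, hc, _⟩
  · exact Or.inl h1.symm
  · exact Or.inr ⟨hc.1.1, hc.2.1⟩

theorem rchA_peel (grid : List (List String)) (X : List (Int × Int)) (p : Int × Int)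
    {s q : Int × Int} (h : RchA grid X s q) :
    q = p ∨ (q ≠ p ∧ ∃ n, (n = s ∨ (Nbr p n ∧ Vill grid n)) ∧
      RchA grid (PySem.Set.add X p) n q) := by
  induction h with
  | refl =>
    by_cases hs : s = p
    · exact Or.inl hs
    · exact Or.inr ⟨hs, s, Or.inl rfl, Relation.ReflTransGen.refl⟩
  | tail h1 h2 ih =>
    rename_i b c
    by_cases hc : c = p
    · exact Or.inl hc
    · refine Or.inr ⟨hc, ?_⟩
      have hcX' : c ∉ PySem.Set.add X p := by
        rw [PySem.Set.mem_add]
        rintro (hm | rfl)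
        · exact h2.2.2 hm
        · exact hc rfl
      rcases ih with rfl | ⟨hbp, n, hn, hpath⟩
      · -- b = p : restart at c, a neighbour of p
        exact ⟨c, Or.inr ⟨(by exact h2.1.2.2 : Nbr b c), h2.1.2.1⟩, Relation.ReflTransGen.refl⟩
      · refine ⟨n, hn, Relation.ReflTransGen.tail hpath ?_⟩
        refine ⟨h2.1, ?_, hcX'⟩
        rw [PySem.Set.mem_add]
        rintro (hm | rfl)
        · exact h2.2.1 hm
        · exact hbp rfl

theorem mem_pushes (grid : List (List String)) (p n : Int × Int) :
    n ∈ ([(p.1, p.2 - 1), (p.1, p.2 + 1), (p.1 - 1, p.2), (p.1 + 1, p.2)] : List (Int × Int)).filter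
        (fun q => pvInB grid q) ↔ Nbr p n ∧ pvInB grid n = true := by
  simp only [List.mem_filter, List.mem_cons, List.not_mem_nil, or_false, Nbr]
  tauto

theorem added_step (grid : List (List String)) (X : PySem.Set (Int × Int)) (p : Int × Int)
    (rest : List (Int × Int)) (hv : Vill grid p) (hpX : p ∉ X) (q : Int × Int) :
    AddedFrom grid (p :: rest) X q ↔
      q = p ∨ AddedFrom grid
        ((([(p.1, p.2 - 1), (p.1, p.2 + 1), (p.1 - 1, p.2), (p.1 + 1, p.2)] : List (Int × Int)).filter
            (fun q => pvInB grid q)) ++ rest) (PySem.Set.add X p) q := by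
  constructor
  · rintro ⟨hVq, hqX, s, hs, hpath⟩
    by_cases hqp : q = p
    · exact Or.inl hqp
    refine Or.inr ⟨hVq, ?_, ?_⟩
    · rw [PySem.Set.mem_add]
      rintro (hm | rfl)
      · exact hqX hm
      · exact hqp rfl
    rcases rchA_peel grid X p hpath with rfl | ⟨_, n, hn, hpath'⟩
    · exact absurd rfl hqp
    rcases hn with rfl | ⟨hnbr, hVn⟩
    · rcases List.mem_cons.1 hs with rfl | hs_rest
      · -- n = s = p : a nonempty X'-path cannot start at p
        rcases rchA_start grid _ hpath' with rfl | ⟨_, hsX'⟩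
        · exact absurd rfl hqp
        · exact absurd ((PySem.Set.mem_add _ _ _).2 (Or.inr rfl)) hsX'
      · exact ⟨n, List.mem_append.2 (Or.inr hs_rest), hpath'⟩
    · exact ⟨n, List.mem_append.2 (Or.inl ((mem_pushes grid p n).2 ⟨hnbr, hVn.1⟩)), hpath'⟩
  · rintro (rfl | ⟨hVq, hqX', s, hs, hpath⟩)
    · exact ⟨hv, hpX, q, List.mem_cons_self, Relation.ReflTransGen.refl⟩
    have hqX : q ∉ X := fun hm => hqX' ((PySem.Set.mem_add _ _ _).2 (Or.inl hm))
    refine ⟨hVq, hqX, ?_⟩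
    have hpath0 : RchA grid X s q := rchA_mono_remove grid X p hpath
    rcases List.mem_append.1 hs with hpush | hrest
    · obtain ⟨hnbr, _⟩ := (mem_pushes grid p s).1 hpush
      rcases rchA_start grid _ hpath with rfl | ⟨hVs, hsX'⟩
      · -- the X'-path is trivial: q = s, a neighbour of p
        exact ⟨p, List.mem_cons_self,
          Relation.ReflTransGen.single ⟨⟨hv, hVq, hnbr⟩, hpX, hqX⟩⟩
      · have hsX : s ∉ X := fun hm => hsX' ((PySem.Set.mem_add _ _ _).2 (Or.inl hm))
        exact ⟨p, List.mem_cons_self,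
          Relation.ReflTransGen.head ⟨⟨hv, hVs, hnbr⟩, hpX, hsX⟩ hpath0⟩
    · exact ⟨s, List.mem_cons_of_mem p hrest, hpath0⟩

theorem added_skip (grid : List (List String)) (X : PySem.Set (Int × Int)) (p : Int × Int)
    (rest : List (Int × Int))
    (hskip : p ∈ X ∨ ¬ Vill grid p) (q : Int × Int) :
    AddedFrom grid (p :: rest) X q ↔ AddedFrom grid rest X q := by
  constructor
  · rintro ⟨hVq, hqX, s, hs, hpath⟩
    rcases List.mem_cons.1 hs with rfl | hs_rest
    · rcases rchA_start grid _ hpath with rfl | ⟨hVs, hsX⟩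
      · rcases hskip with hmem | hnv
        · exact absurd hmem hqX
        · exact absurd hVq hnv
      · rcases hskip with hmem | hnv
        · exact absurd hmem hsX
        · exact absurd hVs hnv
    · exact ⟨hVq, hqX, s, hs_rest, hpath⟩
  · rintro ⟨hVq, hqX, s, hs, hpath⟩
    exact ⟨hVq, hqX, s, List.mem_cons_of_mem p hs, hpath⟩

theorem dfsLoop_spec (grid : List (List String)) : ∀ (stack : List (Int × Int))
    (X : PySem.Set (Int × Int)) (cl : List (Int × Int)),
    (∀ s ∈ stack, pvInB grid s = true) →
    ∀ q : Int × Int,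
      (q ∈ (dfsLoop grid "village" stack X cl).1 ↔ q ∈ X ∨ AddedFrom grid stack X q) ∧
      (q ∈ (dfsLoop grid "village" stack X cl).2 ↔ q ∈ cl ∨ AddedFrom grid stack X q) := by
  intro stack X cl
  induction stack, X, cl using dfsLoop.induct (grid := grid) (terrain := "village") with
  | case1 X cl =>
    intro _ q
    rw [dfsLoop]
    constructor <;> simp [AddedFrom]
  | case2 X cl p rest hcond ih =>
    intro hstack q
    rw [Bool.and_eq_true, Bool.not_eq_true', beq_iff_eq] at hcond
    obtain ⟨hnc, hlook⟩ := hcond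
    have hpX : p ∉ X := fun hm => by
      rw [(PySem.Set.contains_iff X p).2 hm] at hnc; cases hnc
    have hVp : Vill grid p := ⟨hstack p List.mem_cons_self, hlook⟩
    have hstack' : ∀ s ∈ (([(p.1, p.2 - 1), (p.1, p.2 + 1), (p.1 - 1, p.2), (p.1 + 1, p.2)] :
        List (Int × Int)).filter (fun q => pvInB grid q)) ++ rest, pvInB grid s = true := by
      intro s hs
      rcases List.mem_append.1 hs with hp | hr
      · exact ((mem_pushes grid p s).1 hp).2
      · exact hstack s (List.mem_cons_of_mem p hr)
    have hih := ih hstack' q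
    rw [dfsLoop]
    rw [if_pos (by rw [Bool.and_eq_true, Bool.not_eq_true', beq_iff_eq]; exact ⟨hnc, hlook⟩)]
    constructor
    · rw [hih.1, added_step grid X p rest hVp hpX q, PySem.Set.mem_add]
      tauto
    · rw [hih.2, added_step grid X p rest hVp hpX q, List.mem_append, List.mem_singleton]
      tauto
  | case3 X cl p rest hcond ih =>
    intro hstack q
    rw [Bool.and_eq_true, Bool.not_eq_true', beq_iff_eq, not_and_or] at hcond
    have hskip : p ∈ X ∨ ¬ Vill grid p := by
      rcases hcond with h | h
      · left
        have ht : PySem.Set.contains X p = true := by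
          cases hc : PySem.Set.contains X p
          · exact absurd hc h
          · rfl
        exact (PySem.Set.contains_iff X p).1 ht
      · exact Or.inr (fun hv => h hv.2)
    have hih := ih (fun s hs => hstack s (List.mem_cons_of_mem p hs)) q
    rw [dfsLoop]
    rw [if_neg (by
      rw [Bool.and_eq_true, Bool.not_eq_true', beq_iff_eq, not_and_or]
      exact hcond)]
    constructor
    · rw [hih.1, added_skip grid X p rest hskip q]
    · rw [hih.2, added_skip grid X p rest hskip q]

theorem pv_forall₂_append {α β : Type} (R : α → β → Prop) {l1 l1' : List α} {l2 l2' : List β}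
    (h : List.Forall₂ R l1 l2) (h' : List.Forall₂ R l1' l2') :
    List.Forall₂ R (l1 ++ l1') (l2 ++ l2') := by
  induction h with
  | nil => simpa using h'
  | cons hab hrest ih => simpa using List.Forall₂.cons hab ih

theorem conn_closed (grid : List (List String)) (X : PySem.Set (Int × Int))
    (hcl : ∀ a b, a ∈ X → Adj grid a b → b ∈ X) {a q : Int × Int}
    (ha : a ∈ X) (h : Conn grid a q) : q ∈ X := by
  induction h with
  | refl => exact ha
  | tail _ h2 ih => exact hcl _ _ ih h2

theorem conn_in_avoid (grid : List (List String)) (X : PySem.Set (Int × Int))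
    (hcl : ∀ a b, a ∈ X → Adj grid a b → b ∈ X) {p q : Int × Int}
    (hqX : q ∉ X) (h : Conn grid p q) : p ∉ X → RchA grid X p q := by
  induction h using Relation.ReflTransGen.head_induction_on with
  | refl => exact fun _ => Relation.ReflTransGen.refl
  | head hadj hrest ih =>
    rename_i a c
    intro haX
    have hcX : c ∉ X := by
      intro hcmem
      exact hqX (conn_closed grid X hcl hcmem (Relation.ReflTransGen.mono (fun _ _ h => h) hrest))
    exact Relation.ReflTransGen.head ⟨hadj, haX, hcX⟩ (ih hcX)

def OuterInv (grid : List (List String)) (P : List (Int × Int))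
    (st : PySem.Set (Int × Int) × List (List (Int × Int))) : Prop :=
  ∃ reps : List (Int × Int),
    (∀ q, q ∈ st.1 ↔ Vill grid q ∧ ∃ r ∈ reps, Conn grid r q) ∧
    (∀ r ∈ reps, Vill grid r) ∧
    reps.Pairwise (fun a b => ¬ Conn grid a b) ∧
    List.Forall₂ (fun r cl => ∀ q, q ∈ cl ↔ Vill grid q ∧ Conn grid r q) reps st.2 ∧
    (∀ q ∈ P, Vill grid q → q ∈ st.1)

theorem outer_step (grid : List (List String)) (P : List (Int × Int))
    (st : PySem.Set (Int × Int) × List (List (Int × Int))) (p : Int × Int)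
    (hp : p ∈ pvCells grid) (hInv : OuterInv grid P st) :
    OuterInv grid (P ++ [p])
      (if (!(PySem.Set.contains st.1 p)) && (pvLookup grid p.1 p.2 == "village") then
        ((dfsLoop grid "village" [p] st.1 []).1, st.2 ++ [(dfsLoop grid "village" [p] st.1 []).2])
      else st) := by
  obtain ⟨reps, hchar, hvill, hpair, hfa, hscan⟩ := hInv
  by_cases hcond : ((!(PySem.Set.contains st.1 p)) && (pvLookup grid p.1 p.2 == "village")) = true
  · rw [if_pos hcond]
    rw [Bool.and_eq_true, Bool.not_eq_true', beq_iff_eq] at hcond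
    obtain ⟨hnc, hlook⟩ := hcond
    have hpX : p ∉ st.1 := fun hm => by
      rw [(PySem.Set.contains_iff st.1 p).2 hm] at hnc; cases hnc
    have hVp : Vill grid p := ⟨(pvCells_mem grid p).1 hp, hlook⟩
    have hcl : ∀ a b, a ∈ st.1 → Adj grid a b → b ∈ st.1 := by
      intro a b ha hadj
      obtain ⟨hVa, r, hr, hconn⟩ := (hchar a).1 ha
      exact (hchar b).2 ⟨hadj.2.1, r, hr, Relation.ReflTransGen.tail hconn hadj⟩
    have hspec := dfsLoop_spec grid [p] st.1 []
      (by intro s hs; rcases List.mem_singleton.1 hs with rfl; exact hVp.1)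
    have hAdded : ∀ q, AddedFrom grid [p] st.1 q ↔ Vill grid q ∧ Conn grid p q := by
      intro q
      constructor
      · rintro ⟨hVq, hqX, s, hs, hpath⟩
        rcases List.mem_singleton.1 hs with rfl
        exact ⟨hVq, rchA_to_conn grid st.1 hpath⟩
      · rintro ⟨hVq, hconn⟩
        have hqX : q ∉ st.1 := by
          intro hq
          obtain ⟨_, r, hr, hconn_rq⟩ := (hchar q).1 hq
          exact hpX ((hchar p).2 ⟨hVp, r, hr,
            conn_trans grid hconn_rq (conn_symm grid hconn)⟩)
        exact ⟨hVq, hqX, p, List.mem_singleton.2 rfl,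
          conn_in_avoid grid st.1 hcl hqX hconn hpX⟩
    refine ⟨reps ++ [p], ?_, ?_, ?_, ?_, ?_⟩
    · intro q
      rw [(hspec q).1, hAdded q]
      constructor
      · rintro (hq | ⟨hVq, hconn⟩)
        · obtain ⟨hVq, r, hr, hconn⟩ := (hchar q).1 hq
          exact ⟨hVq, r, List.mem_append.2 (Or.inl hr), hconn⟩
        · exact ⟨hVq, p, List.mem_append.2 (Or.inr (List.mem_singleton.2 rfl)), hconn⟩
      · rintro ⟨hVq, r, hr, hconn⟩
        rcases List.mem_append.1 hr with hr | hr
        · exact Or.inl ((hchar q).2 ⟨hVq, r, hr, hconn⟩)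
        · rcases List.mem_singleton.1 hr with rfl
          exact Or.inr ⟨hVq, hconn⟩
    · intro r hr
      rcases List.mem_append.1 hr with hr | hr
      · exact hvill r hr
      · rcases List.mem_singleton.1 hr with rfl; exact hVp
    · rw [List.pairwise_append]
      refine ⟨hpair, List.pairwise_singleton _ _, ?_⟩
      intro r hr p' hp' hconn
      have heq := List.mem_singleton.1 hp'
      subst heq
      exact hpX ((hchar _).2 ⟨hVp, r, hr, hconn⟩)
    · refine pv_forall₂_append _ hfa ?_
      refine List.forall₂_cons.2 ⟨?_, List.forall₂_nil_left_iff.2 rfl⟩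
      intro q
      rw [(hspec q).2, hAdded q]
      simp
    · intro q hq hVq
      rcases List.mem_append.1 hq with hq | hq
      · exact ((hspec q).1).2 (Or.inl (hscan q hq hVq))
      · rcases List.mem_singleton.1 hq with rfl
        exact ((hspec q).1).2 (Or.inr ((hAdded q).2 ⟨hVq, Relation.ReflTransGen.refl⟩))
  · rw [if_neg hcond]
    rw [Bool.and_eq_true, Bool.not_eq_true', beq_iff_eq, not_and_or] at hcond
    refine ⟨reps, hchar, hvill, hpair, hfa, ?_⟩
    intro q hq hVq
    rcases List.mem_append.1 hq with hq | hq
    · exact hscan q hq hVq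
    · rcases List.mem_singleton.1 hq with rfl
      rcases hcond with h | h
      · have ht : PySem.Set.contains st.1 q = true := by
          cases hc : PySem.Set.contains st.1 q
          · exact absurd hc h
          · rfl
        exact (PySem.Set.contains_iff st.1 q).1 ht
      · exact absurd hVq.2 h

theorem outerA_inv_aux (grid : List (List String)) : ∀ (cells P : List (Int × Int))
    (st : PySem.Set (Int × Int) × List (List (Int × Int))),
    (∀ c ∈ cells, c ∈ pvCells grid) → OuterInv grid P st →
    OuterInv grid (P ++ cells)
      (cells.foldl (fun st p =>
        if (!(PySem.Set.contains st.1 p)) && (pvLookup grid p.1 p.2 == "village") then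
          let r := dfsLoop grid "village" [p] st.1 []
          (r.1, st.2 ++ [r.2])
        else st) st) := by
  intro cells
  induction cells with
  | nil => intro P st _ h; simpa using h
  | cons c cells ih =>
    intro P st hcells hInv
    have h1 := outer_step grid P st c (hcells c List.mem_cons_self) hInv
    have h2 := ih (P ++ [c]) _ (fun c' hc' => hcells c' (List.mem_cons_of_mem c hc')) h1
    rw [List.append_assoc] at h2
    simpa using h2

theorem outerA_inv (grid : List (List String)) :
    OuterInv grid (pvCells grid) (outerA grid) := by
  have h := outerA_inv_aux grid (pvCells grid) [] (PySem.Set.empty, [])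
    (fun c hc => hc) ?_
  · simpa [outerA] using h
  · refine ⟨[], ?_, ?_, ?_, ?_, ?_⟩ <;> simp [PySem.Set.empty]

-- ================== scan-order facts ==================
def pvOrd (grid : List (List String)) (p : Int × Int) : Int :=
  p.1 * ((grid.headD []).length : Int) + p.2

theorem pv_cellrange_pairwise (H W : Nat) :
    ((List.range H).flatMap (fun (r : Nat) => (List.range W).map (fun (c : Nat) => ((r : Int), (c : Int))))).Pairwise
      (fun a b => a.1 * (W : Int) + a.2 < b.1 * (W : Int) + b.2) := by
  induction H with
  | zero => simp
  | succ n ih =>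
    rw [List.range_succ, List.flatMap_append]
    rw [List.pairwise_append]
    refine ⟨ih, ?_, ?_⟩
    · simp only [List.flatMap_singleton]
      rw [List.pairwise_map]
      refine List.Pairwise.imp ?_ (List.pairwise_lt_range (n := W))
      intro c c' hlt
      simp only
      omega
    · intro a ha b hb
      obtain ⟨r, hr, ha'⟩ := List.mem_flatMap.1 ha
      obtain ⟨c, hc, rfl⟩ := List.mem_map.1 ha'
      rw [List.flatMap_singleton] at hb
      obtain ⟨c', hc', rfl⟩ := List.mem_map.1 hb
      rw [List.mem_range] at hr hc hc'
      simp only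
      have h1 : (c : Int) < (W : Int) := by omega
      have h2 : (0 : Int) ≤ (c' : Int) := by omega
      have h3 : (r : Int) + 1 ≤ (n : Int) := by omega
      nlinarith [h1, h2, h3]

theorem pvCells_pairwise (grid : List (List String)) :
    (pvCells grid).Pairwise (fun a b => pvOrd grid a < pvOrd grid b) := by
  have h := pv_cellrange_pairwise grid.length (grid.headD []).length
  rw [pvCells]
  exact List.Pairwise.imp (fun hab => by simpa [pvOrd] using hab) h

theorem pv_prefix_facts (grid : List (List String)) (P rest : List (Int × Int)) (p : Int × Int)
    (hdec : pvCells grid = P ++ p :: rest) :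
    pvInB grid p = true ∧ p ∉ P ∧ (∀ q ∈ P, pvOrd grid q < pvOrd grid p) ∧
      (∀ q, pvInB grid q = true → pvOrd grid q < pvOrd grid p → q ∈ P) := by
  have hpw := pvCells_pairwise grid
  rw [hdec] at hpw
  rw [List.pairwise_append] at hpw
  obtain ⟨hP, hrest, hcross⟩ := hpw
  have hordP : ∀ q ∈ P, pvOrd grid q < pvOrd grid p := fun q hq =>
    hcross q hq p List.mem_cons_self
  have hpmem : p ∈ pvCells grid := by rw [hdec]; exact List.mem_append.2 (Or.inr List.mem_cons_self)
  have hpB := (pvCells_mem grid p).1 hpmem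
  refine ⟨hpB, ?_, hordP, ?_⟩
  · intro hp
    have := hordP p hp
    omega
  · intro q hq hordq
    have hqmem : q ∈ pvCells grid := (pvCells_mem grid q).2 hq
    rw [hdec] at hqmem
    rcases List.mem_append.1 hqmem with h | h
    · exact h
    · exfalso
      rcases List.mem_cons.1 h with rfl | h
      · omega
      · have := (List.pairwise_cons.1 hrest).1 q h
        omega

-- connectivity within the scanned prefix
def AdjP (grid : List (List String)) (P : List (Int × Int)) (a b : Int × Int) : Prop :=
  Adj grid a b ∧ a ∈ P ∧ b ∈ P

def ConnP (grid : List (List String)) (P : List (Int × Int)) : Int × Int → Int × Int → Prop :=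
  Relation.ReflTransGen (AdjP grid P)

theorem connP_symm (grid : List (List String)) (P : List (Int × Int)) {a b : Int × Int}
    (h : ConnP grid P a b) : ConnP grid P b a :=
  Relation.ReflTransGen.symmetric
    (fun _ _ hab => ⟨adj_symm grid hab.1, hab.2.2, hab.2.1⟩) h

theorem connP_mono (grid : List (List String)) (P : List (Int × Int)) (p : Int × Int)
    {a b : Int × Int} (h : ConnP grid P a b) : ConnP grid (P ++ [p]) a b :=
  Relation.ReflTransGen.mono
    (fun _ _ hab => ⟨hab.1, List.mem_append.2 (Or.inl hab.2.1), List.mem_append.2 (Or.inl hab.2.2)⟩) h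

theorem connP_full (grid : List (List String)) {a b : Int × Int} :
    ConnP grid (pvCells grid) a b ↔ Conn grid a b := by
  constructor
  · exact Relation.ReflTransGen.mono (fun _ _ hab => hab.1)
  · refine Relation.ReflTransGen.mono ?_
    intro x y hxy
    exact ⟨hxy, (pvCells_mem grid x).2 hxy.1.1, (pvCells_mem grid y).2 hxy.2.1.1⟩

theorem adj_irrefl (grid : List (List String)) (p : Int × Int) (h : Adj grid p p) : False := by
  obtain ⟨_, _, hnbr⟩ := h
  obtain ⟨a, b⟩ := p
  simp only [Nbr, Prod.mk.injEq] at hnbr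
  omega

theorem connP_extend (grid : List (List String)) (P : List (Int × Int)) (p : Int × Int)
    (hpP : p ∉ P) (a b : Int × Int) :
    ConnP grid (P ++ [p]) a b ↔
      (a = p ∧ b = p) ∨
      (a = p ∧ b ≠ p ∧ ∃ n, (Adj grid p n ∧ n ∈ P) ∧ ConnP grid P n b) ∨
      (b = p ∧ a ≠ p ∧ ∃ n, (Adj grid p n ∧ n ∈ P) ∧ ConnP grid P n a) ∨
      (a ≠ p ∧ b ≠ p ∧ (ConnP grid P a b ∨
        ((∃ n, (Adj grid p n ∧ n ∈ P) ∧ ConnP grid P n a) ∧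
         (∃ n, (Adj grid p n ∧ n ∈ P) ∧ ConnP grid P n b)))) := by
  constructor
  · intro h
    induction h with
    | refl =>
      by_cases hap : a = p
      · exact Or.inl ⟨hap, hap⟩
      · exact Or.inr (Or.inr (Or.inr ⟨hap, hap, Or.inl Relation.ReflTransGen.refl⟩))
    | tail h1 h2 ih =>
      rename_i b' b
      obtain ⟨hadj, hb'm, hbm⟩ := h2
      have hmem : ∀ x : Int × Int, x ∈ P ++ [p] → x ∈ P ∨ x = p := by
        intro x hx
        rcases List.mem_append.1 hx with h | h
        · exact Or.inl h
        · exact Or.inr (List.mem_singleton.1 h)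
      rcases hmem b' hb'm with hb'P | hb'e
      · have hb'p : b' ≠ p := fun h => hpP (h ▸ hb'P)
        rcases hmem b hbm with hbP | hbe
        · -- E1 : edge inside P
          have hbp : b ≠ p := fun h => hpP (h ▸ hbP)
          have hedge : AdjP grid P b' b := ⟨hadj, hb'P, hbP⟩
          rcases ih with ⟨_, hb'e⟩ | ⟨hap, _, n, hN, hc⟩ | ⟨hb'e, _, _⟩ | ⟨hap, _, hrest⟩
          · exact absurd hb'e hb'p
          · exact Or.inr (Or.inl ⟨hap, hbp, n, hN, Relation.ReflTransGen.tail hc hedge⟩)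
          · exact absurd hb'e hb'p
          · refine Or.inr (Or.inr (Or.inr ⟨hap, hbp, ?_⟩))
            rcases hrest with hc | ⟨h1', h2'⟩
            · exact Or.inl (Relation.ReflTransGen.tail hc hedge)
            · refine Or.inr ⟨h1', ?_⟩
              obtain ⟨n, hN, hc⟩ := h2'
              exact ⟨n, hN, Relation.ReflTransGen.tail hc hedge⟩
        · -- E3 : b = p, b' ∈ P
          have hadj' : Adj grid b' p := hbe ▸ hadj
          rcases ih with ⟨_, hb'e⟩ | ⟨hae, _, _⟩ | ⟨hb'e, _, _⟩ | ⟨hap, _, hrest⟩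
          · exact absurd hb'e hb'p
          · exact Or.inl ⟨hae, hbe⟩
          · exact absurd hb'e hb'p
          · refine Or.inr (Or.inr (Or.inl ⟨hbe, hap, ?_⟩))
            have hNb' : Adj grid p b' ∧ b' ∈ P := ⟨adj_symm grid hadj', hb'P⟩
            rcases hrest with hc | ⟨⟨n, hN, hc⟩, _⟩
            · exact ⟨b', hNb', connP_symm grid P hc⟩
            · exact ⟨n, hN, hc⟩
      · -- E2 : b' = p
        rcases hmem b hbm with hbP | hbe
        · have hbp : b ≠ p := fun h => hpP (h ▸ hbP)
          have hNb : Adj grid p b ∧ b ∈ P := ⟨hb'e ▸ hadj, hbP⟩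
          rcases ih with ⟨hae, _⟩ | ⟨_, hne, _⟩ | ⟨_, hap, n, hN, hc⟩ | ⟨_, hne, _⟩
          · exact Or.inr (Or.inl ⟨hae, hbp, b, hNb, Relation.ReflTransGen.refl⟩)
          · exact absurd hb'e hne
          · exact Or.inr (Or.inr (Or.inr ⟨hap, hbp,
              Or.inr ⟨⟨n, hN, hc⟩, ⟨b, hNb, Relation.ReflTransGen.refl⟩⟩⟩))
          · exact absurd hb'e hne
        · exfalso
          rw [hb'e, hbe] at hadj
          exact adj_irrefl grid p hadj
  · rintro (⟨hae, hbe⟩ | ⟨hae, _, n, ⟨hadj, hnP⟩, hc⟩ | ⟨hbe, _, n, ⟨hadj, hnP⟩, hc⟩ |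
      ⟨_, _, hc | ⟨⟨n1, ⟨hadj1, hn1P⟩, hc1⟩, ⟨n2, ⟨hadj2, hn2P⟩, hc2⟩⟩⟩)
    · rw [hae, hbe]
      exact Relation.ReflTransGen.refl
    · rw [hae]
      exact Relation.ReflTransGen.head
        ⟨hadj, List.mem_append.2 (Or.inr (List.mem_singleton.2 rfl)), List.mem_append.2 (Or.inl hnP)⟩
        (connP_mono grid P p hc)
    · rw [hbe]
      exact Relation.ReflTransGen.tail (connP_mono grid P p (connP_symm grid P hc))
        ⟨adj_symm grid hadj, List.mem_append.2 (Or.inl hnP),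
          List.mem_append.2 (Or.inr (List.mem_singleton.2 rfl))⟩
    · exact connP_mono grid P p hc
    · refine Relation.ReflTransGen.trans (connP_mono grid P p (connP_symm grid P hc1)) ?_
      refine Relation.ReflTransGen.head
        ⟨adj_symm grid hadj1, List.mem_append.2 (Or.inl hn1P),
          List.mem_append.2 (Or.inr (List.mem_singleton.2 rfl))⟩ ?_
      exact Relation.ReflTransGen.head
        ⟨hadj2, List.mem_append.2 (Or.inr (List.mem_singleton.2 rfl)), List.mem_append.2 (Or.inl hn2P)⟩
        (connP_mono grid P p hc2)
theorem pv_min?_isSome {α κ : Type} [LT κ] [DecidableLT κ] (xs : List α) (key : α → κ)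
    (h : xs ≠ []) : (PySem.List.min? xs key).isSome = true := by
  cases xs with
  | nil => exact absurd rfl h
  | cons a tl =>
    simp only [PySem.List.min?]
    have aux : ∀ (tl : List α) (m : α),
        (List.foldl (fun acc x =>
            match acc with
            | none => some x
            | some m => if key x < key m then some x else some m) (some m) tl).isSome = true := by
      intro tl
      induction tl with
      | nil => intro m; rfl
      | cons x tl ih =>
        intro m
        simp only [List.foldl_cons]
        by_cases hx : key x < key m
        · rw [if_pos hx]; exact ih x
        · rw [if_neg hx]; exact ih m
    simp only [List.foldl_cons]
    exact aux tl a

theorem pv_min_getD_mem (ns : List Int) (h : ns ≠ []) :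
    (PySem.List.min? ns (fun x => x)).getD 0 ∈ ns := by
  cases hm : (PySem.List.min? ns (fun x => x)) with
  | none =>
    exfalso
    have := pv_min?_isSome ns (fun x => x) h
    rw [hm] at this
    cases this
  | some m =>
    rw [Option.getD_some]
    exact PySem.List.min?_mem hm

theorem relabel_get? (keep : Int) (ns : List Int) :
    ∀ (ks : List (Int × Int)) (d : PySem.Dict (Int × Int) Int), ks.Nodup →
    ∀ q, PySem.Dict.get?
        (ks.foldl (fun d q => if PySem.Dict.getD d q 0 ∈ ns then PySem.Dict.insert d q keep else d) d) q
      = if q ∈ ks ∧ PySem.Dict.getD d q 0 ∈ ns then some keep else PySem.Dict.get? d q := by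
  intro ks
  induction ks with
  | nil =>
    intro d _ q
    simp
  | cons k tl ih =>
    intro d hnd q
    have hknotin : k ∉ tl := (List.nodup_cons.1 hnd).1
    have hnd' : tl.Nodup := (List.nodup_cons.1 hnd).2
    simp only [List.foldl_cons]
    rw [ih (if PySem.Dict.getD d k 0 ∈ ns then PySem.Dict.insert d k keep else d) hnd' q]
    by_cases hq : q = k
    · subst hq
      have hnotin : ¬ (q ∈ tl ∧ PySem.Dict.getD
          (if PySem.Dict.getD d q 0 ∈ ns then PySem.Dict.insert d q keep else d) q 0 ∈ ns) :=
        fun hc => hknotin hc.1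
      rw [if_neg hnotin]
      by_cases hc : PySem.Dict.getD d q 0 ∈ ns
      · rw [if_pos hc, PySem.Dict.get?_insert_self, if_pos ⟨List.mem_cons_self, hc⟩]
      · rw [if_neg hc, if_neg (fun hAnd => hc (by
          rcases List.mem_cons.1 hAnd.1 with h | h
          · exact hAnd.2
          · exact hAnd.2))]
    · have hgd : PySem.Dict.getD
          (if PySem.Dict.getD d k 0 ∈ ns then PySem.Dict.insert d k keep else d) q 0
          = PySem.Dict.getD d q 0 := by
        split
        · rw [PySem.Dict.getD_eq_get?_getD, PySem.Dict.get?_insert_of_ne _ _ hq,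
            ← PySem.Dict.getD_eq_get?_getD]
        · rfl
      have hg : PySem.Dict.get?
          (if PySem.Dict.getD d k 0 ∈ ns then PySem.Dict.insert d k keep else d) q
          = PySem.Dict.get? d q := by
        split
        · rw [PySem.Dict.get?_insert_of_ne _ _ hq]
        · rfl
      rw [hgd, hg]
      by_cases hqt : q ∈ tl
      · have h2 : q ∈ k :: tl := List.mem_cons_of_mem k hqt
        by_cases hc : PySem.Dict.getD d q 0 ∈ ns
        · rw [if_pos ⟨hqt, hc⟩, if_pos ⟨h2, hc⟩]
        · rw [if_neg (fun h => hc h.2), if_neg (fun h => hc h.2)]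
      · have h2 : q ∉ k :: tl := by
          intro h
          rcases List.mem_cons.1 h with h | h
          · exact hq h
          · exact hqt h
        rw [if_neg (fun h => hqt h.1), if_neg (fun h => h2 h.1)]

theorem relabel_nodup (keep : Int) (ns : List Int) :
    ∀ (ks : List (Int × Int)) (d : PySem.Dict (Int × Int) Int), d.keys.Nodup →
    (ks.foldl (fun d q => if PySem.Dict.getD d q 0 ∈ ns then PySem.Dict.insert d q keep else d) d).keys.Nodup := by
  intro ks
  induction ks with
  | nil => intro d h; exact h
  | cons k tl ih =>
    intro d h
    simp only [List.foldl_cons]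
    apply ih
    split
    · exact PySem.Dict.nodup_keys_insert d k keep h
    · exact h

def InvB (grid : List (List String)) (P : List (Int × Int))
    (st : PySem.Dict (Int × Int) Int × Int) : Prop :=
  (∀ q, (PySem.Dict.get? st.1 q).isSome = true ↔ Vill grid q ∧ q ∈ P) ∧
  (∀ a b la lb, PySem.Dict.get? st.1 a = some la → PySem.Dict.get? st.1 b = some lb →
    (la = lb ↔ ConnP grid P a b)) ∧
  (∀ q l, PySem.Dict.get? st.1 q = some l → 0 ≤ l ∧ l < st.2) ∧
  (PySem.Dict.keys st.1).Nodup ∧ 0 ≤ st.2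

theorem bPass1_step (grid : List (List String)) (P rest : List (Int × Int)) (p : Int × Int)
    (st : PySem.Dict (Int × Int) Int × Int)
    (hdec : pvCells grid = P ++ p :: rest) (hInv : InvB grid P st) :
    InvB grid (P ++ [p])
      ((fun (st : PySem.Dict (Int × Int) Int × Int) (p : Int × Int) =>
        if pvLookup grid p.1 p.2 ≠ "village" then st
        else
          let ns := ([(p.1 - 1, p.2), (p.1, p.2 - 1)] : List (Int × Int)).filterMap
            (fun q => PySem.Dict.get? st.1 q)
          if ns = [] then (PySem.Dict.insert st.1 p st.2, st.2 + 1)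
          else
            let keep := (PySem.List.min? ns (fun x => x)).getD 0
            let d := PySem.Dict.insert st.1 p keep
            ((PySem.Dict.keys d).foldl
                (fun d q => if PySem.Dict.getD d q 0 ∈ ns then PySem.Dict.insert d q keep else d) d,
              st.2)) st p) := by
  obtain ⟨h1, h2, h3, h4, h5⟩ := hInv
  obtain ⟨hpB, hpP, hordP, hmemP⟩ := pv_prefix_facts grid P rest p hdec
  have hmem1 : ∀ q : Int × Int, q ∈ P ++ [p] ↔ q ∈ P ∨ q = p := by
    intro q
    rw [List.mem_append, List.mem_singleton]
  dsimp only
  by_cases hlook : pvLookup grid p.1 p.2 = "village"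
  case neg =>
    rw [if_pos (by exact hlook)]
    have hnVp : ¬ Vill grid p := fun hv => hlook hv.2
    refine ⟨?_, ?_, h3, h4, h5⟩
    · intro q
      rw [h1 q]
      constructor
      · rintro ⟨hv, hq⟩
        exact ⟨hv, (hmem1 q).2 (Or.inl hq)⟩
      · rintro ⟨hv, hq⟩
        rcases (hmem1 q).1 hq with hq | rfl
        · exact ⟨hv, hq⟩
        · exact absurd hv hnVp
    · intro a b la lb ha hb
      have haP : Vill grid a ∧ a ∈ P := (h1 a).1 (by rw [ha]; rfl)
      have hbP : Vill grid b ∧ b ∈ P := (h1 b).1 (by rw [hb]; rfl)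
      have hap : a ≠ p := fun h => hnVp (h ▸ haP.1)
      have hbp : b ≠ p := fun h => hnVp (h ▸ hbP.1)
      rw [h2 a b la lb ha hb, connP_extend grid P p hpP a b]
      constructor
      · intro hc
        exact Or.inr (Or.inr (Or.inr ⟨hap, hbp, Or.inl hc⟩))
      · rintro (⟨hae, _⟩ | ⟨hae, _, _⟩ | ⟨_, hap', _⟩ | ⟨_, _, hc | ⟨_, ⟨n, ⟨hadj, _⟩, _⟩⟩⟩)
        · exact absurd hae hap
        · exact absurd hae hap
        · exact absurd (by assumption : b = p) hbp
        · exact hc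
        · exact absurd hadj.1 hnVp
  case pos =>
    rw [if_neg (by simpa using hlook)]
    have hVp : Vill grid p := ⟨hpB, hlook⟩
    have hW1 : (1 : Int) ≤ ((grid.headD []).length : Int) := by
      rw [pvInB, decide_eq_true_eq] at hpB
      omega
    -- the labels found at the up/left neighbours are exactly the labels of scanned village
    -- neighbours of p
    have ns_char : ∀ l : Int,
        l ∈ (([(p.1 - 1, p.2), (p.1, p.2 - 1)] : List (Int × Int)).filterMap
          (fun q => PySem.Dict.get? st.1 q)) ↔
        ∃ n, (Adj grid p n ∧ n ∈ P) ∧ PySem.Dict.get? st.1 n = some l := by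
      intro l
      rw [List.mem_filterMap]
      constructor
      · rintro ⟨q, hq, hsome⟩
        have hqPV : Vill grid q ∧ q ∈ P := (h1 q).1 (by rw [hsome]; rfl)
        refine ⟨q, ⟨⟨hVp, hqPV.1, ?_⟩, hqPV.2⟩, hsome⟩
        rcases List.mem_cons.1 hq with rfl | hq
        · exact Or.inr (Or.inl rfl)
        · rcases List.mem_singleton.1 hq with rfl
          exact Or.inr (Or.inr (Or.inr rfl))
      · rintro ⟨n, ⟨⟨_, _, hnbr⟩, hnP⟩, hsome⟩
        refine ⟨n, ?_, hsome⟩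
        have hordn := hordP n hnP
        rcases hnbr with he | he | he | he
        · exfalso
          rw [he] at hordn
          simp only [pvOrd] at hordn
          have : (p.1 + 1) * ((grid.headD []).length : Int) =
              p.1 * ((grid.headD []).length : Int) + ((grid.headD []).length : Int) := by ring
          omega
        · rw [he]; exact List.mem_cons_self
        · exfalso
          rw [he] at hordn
          simp only [pvOrd] at hordn
          omega
        · rw [he]; exact List.mem_cons_of_mem _ (List.mem_singleton.2 rfl)
    by_cases hns : (([(p.1 - 1, p.2), (p.1, p.2 - 1)] : List (Int × Int)).filterMap
        (fun q => PySem.Dict.get? st.1 q)) = []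
    case pos =>
      rw [if_pos hns]
      have hNempty : ∀ n, ¬ (Adj grid p n ∧ n ∈ P) := by
        intro n hN
        have hsome : (PySem.Dict.get? st.1 n).isSome = true := (h1 n).2 ⟨hN.1.2.1, hN.2⟩
        obtain ⟨ln, hln⟩ := Option.isSome_iff_exists.1 hsome
        have : ln ∈ (([(p.1 - 1, p.2), (p.1, p.2 - 1)] : List (Int × Int)).filterMap
            (fun q => PySem.Dict.get? st.1 q)) := (ns_char ln).2 ⟨n, hN, hln⟩
        rw [hns] at this
        exact List.not_mem_nil this
      refine ⟨?_, ?_, ?_, PySem.Dict.nodup_keys_insert st.1 p st.2 h4, by simp; omega⟩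
      · intro q
        rw [PySem.Dict.get?_insert]
        by_cases hq : q = p
        · subst hq
          rw [if_pos rfl]
          simp only [Option.isSome_some, true_iff]
          exact ⟨hVp, (hmem1 q).2 (Or.inr rfl)⟩
        · rw [if_neg hq, h1 q]
          constructor
          · rintro ⟨hv, hqP⟩
            exact ⟨hv, (hmem1 q).2 (Or.inl hqP)⟩
          · rintro ⟨hv, hqP⟩
            rcases (hmem1 q).1 hqP with hqP | rfl
            · exact ⟨hv, hqP⟩
            · exact absurd rfl hq
      · intro a b la lb ha hb
        rw [PySem.Dict.get?_insert] at ha hb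
        rw [connP_extend grid P p hpP a b]
        by_cases hap : a = p <;> by_cases hbp : b = p
        · subst hap; subst hbp
          rw [if_pos rfl] at ha hb
          cases ha; cases hb
          constructor
          · intro _; exact Or.inl ⟨rfl, rfl⟩
          · intro _; rfl
        · subst hap
          rw [if_pos rfl] at ha
          rw [if_neg hbp] at hb
          cases ha
          have hlt := (h3 b lb hb).2
          constructor
          · intro h; omega
          · rintro (⟨_, hbe⟩ | ⟨_, _, n, hN, _⟩ | ⟨hbe, _, _⟩ | ⟨hae, _, _⟩)
            · exact absurd hbe hbp
            · exact absurd hN (hNempty n)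
            · exact absurd hbe hbp
            · exact absurd rfl hae
        · subst hbp
          rw [if_pos rfl] at hb
          rw [if_neg hap] at ha
          cases hb
          have hlt := (h3 a la ha).2
          constructor
          · intro h; omega
          · rintro (⟨hae, _⟩ | ⟨hae, _, _⟩ | ⟨_, _, n, hN, _⟩ | ⟨_, hbe, _⟩)
            · exact absurd hae hap
            · exact absurd hae hap
            · exact absurd hN (hNempty n)
            · exact absurd rfl hbe
        · rw [if_neg hap] at ha
          rw [if_neg hbp] at hb
          rw [h2 a b la lb ha hb]
          constructor
          · intro hc
            exact Or.inr (Or.inr (Or.inr ⟨hap, hbp, Or.inl hc⟩))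
          · rintro (⟨hae, _⟩ | ⟨hae, _, _⟩ | ⟨_, hap', n, hN, _⟩ | ⟨_, _, hc | ⟨⟨n, hN, _⟩, _⟩⟩)
            · exact absurd hae hap
            · exact absurd hae hap
            · exact absurd hN (hNempty n)
            · exact hc
            · exact absurd hN (hNempty n)
      · intro q l hq
        rw [PySem.Dict.get?_insert] at hq
        by_cases hqp : q = p
        · rw [if_pos hqp] at hq
          cases hq
          simp only
          omega
        · rw [if_neg hqp] at hq
          have := h3 q l hq
          simp only
          omega
    case neg =>
      rw [if_neg hns]
      set NS := (([(p.1 - 1, p.2), (p.1, p.2 - 1)] : List (Int × Int)).filterMap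
        (fun q => PySem.Dict.get? st.1 q)) with hNS
      set keep := (PySem.List.min? NS (fun x => x)).getD 0 with hkeep
      set d1 := PySem.Dict.insert st.1 p keep with hd1
      set d2 := (PySem.Dict.keys d1).foldl
        (fun d q => if PySem.Dict.getD d q 0 ∈ NS then PySem.Dict.insert d q keep else d) d1 with hd2
      have hkeepNS : keep ∈ NS := by
        have h := pv_min_getD_mem NS hns
        rw [← hkeep] at h
        exact h
      obtain ⟨nk, hNnk, hknk⟩ := (ns_char keep).1 hkeepNS
      have hkeep_lb := h3 nk keep hknk
      have hnd1 : (PySem.Dict.keys d1).Nodup := PySem.Dict.nodup_keys_insert st.1 p keep h4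
      have hkeys1 : ∀ q, q ∈ PySem.Dict.keys d1 ↔ (PySem.Dict.get? d1 q).isSome = true := by
        intro q
        rw [← PySem.Dict.contains_iff_mem_keys, PySem.Dict.contains_eq_isSome_get?]
      have hg1 : ∀ q, PySem.Dict.get? d1 q = if q = p then some keep else PySem.Dict.get? st.1 q :=
        fun q => PySem.Dict.get?_insert st.1 p q keep
      have hG0 : ∀ q, PySem.Dict.get? d2 q =
          if q ∈ PySem.Dict.keys d1 ∧ PySem.Dict.getD d1 q 0 ∈ NS then some keep
          else PySem.Dict.get? d1 q :=
        fun q => relabel_get? keep NS (PySem.Dict.keys d1) d1 hnd1 q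
      have hGp : PySem.Dict.get? d2 p = some keep := by
        rw [hG0 p]
        rw [if_pos ⟨(hkeys1 p).2 (by rw [hg1 p, if_pos rfl]; rfl),
          by rw [PySem.Dict.getD_eq_get?_getD, hg1 p, if_pos rfl]; exact hkeepNS⟩]
      have hGold : ∀ q, q ≠ p → PySem.Dict.get? d2 q =
          (PySem.Dict.get? st.1 q).map (fun l => if l ∈ NS then keep else l) := by
        intro q hq
        rw [hG0 q]
        cases hql : PySem.Dict.get? st.1 q with
        | none =>
          have hnone : PySem.Dict.get? d1 q = none := by rw [hg1 q, if_neg hq]; exact hql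
          rw [if_neg (fun hc => by
            have := (hkeys1 q).1 hc.1
            rw [hnone] at this
            cases this)]
          rw [hnone]
          rfl
        | some l =>
          have hd1q : PySem.Dict.get? d1 q = some l := by rw [hg1 q, if_neg hq]; exact hql
          have hgd : PySem.Dict.getD d1 q 0 = l := by
            rw [PySem.Dict.getD_eq_get?_getD, hd1q]
            rfl
          by_cases hl : l ∈ NS
          · rw [if_pos ⟨(hkeys1 q).2 (by rw [hd1q]; rfl), by rw [hgd]; exact hl⟩]
            simp only [Option.map_some, hl, if_pos]
          · rw [if_neg (fun hc => hl (hgd ▸ hc.2))]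
            rw [hd1q]
            simp only [Option.map_some, hl, if_false]
      have hlab : ∀ x lx, PySem.Dict.get? st.1 x = some lx →
          (lx ∈ NS ↔ ∃ n, (Adj grid p n ∧ n ∈ P) ∧ ConnP grid P n x) := by
        intro x lx hx
        constructor
        · intro hlx
          obtain ⟨n, hN, hsome_n⟩ := (ns_char lx).1 hlx
          exact ⟨n, hN, (h2 n x lx lx hsome_n hx).1 rfl⟩
        · rintro ⟨n, hN, hconn⟩
          have hsome : (PySem.Dict.get? st.1 n).isSome = true := (h1 n).2 ⟨hN.1.2.1, hN.2⟩
          obtain ⟨ln, hln⟩ := Option.isSome_iff_exists.1 hsome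
          have heq : ln = lx := (h2 n x ln lx hln hx).2 hconn
          rw [← heq]
          exact (ns_char ln).2 ⟨n, hN, hln⟩
      have hGsome : ∀ q, (PySem.Dict.get? d2 q).isSome = true ↔
          (q = p ∨ (PySem.Dict.get? st.1 q).isSome = true) := by
        intro q
        by_cases hq : q = p
        · subst hq
          rw [hGp]
          simp
        · rw [hGold q hq, Option.isSome_map]
          simp [hq]
      refine ⟨?_, ?_, ?_, relabel_nodup keep NS (PySem.Dict.keys d1) d1 hnd1, h5⟩
      · intro q
        rw [hGsome q]
        constructor
        · rintro (rfl | hq)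
          · exact ⟨hVp, (hmem1 q).2 (Or.inr rfl)⟩
          · obtain ⟨hv, hqP⟩ := (h1 q).1 hq
            exact ⟨hv, (hmem1 q).2 (Or.inl hqP)⟩
        · rintro ⟨hv, hqm⟩
          rcases (hmem1 q).1 hqm with hqP | rfl
          · exact Or.inr ((h1 q).2 ⟨hv, hqP⟩)
          · exact Or.inl rfl
      · intro a b la lb ha hb
        rw [connP_extend grid P p hpP a b]
        by_cases hap : a = p <;> by_cases hbp : b = p
        · subst hap; subst hbp
          rw [hGp] at ha hb
          have hla : la = keep := (Option.some.inj ha).symm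
          have hlb : lb = keep := (Option.some.inj hb).symm
          subst hla; subst hlb
          constructor
          · intro _
            exact Or.inl ⟨rfl, rfl⟩
          · intro _
            rfl
        · subst hap
          rw [hGp] at ha
          have hla : la = keep := (Option.some.inj ha).symm
          subst hla
          rw [hGold b hbp] at hb
          obtain ⟨lb0, hb0, hfb⟩ := Option.map_eq_some_iff.1 hb
          have hchain := hlab b lb0 hb0
          constructor
          · intro he
            by_cases hlb0 : lb0 ∈ NS
            · exact Or.inr (Or.inl ⟨rfl, hbp, hchain.1 hlb0⟩)
            · exfalso
              rw [if_neg hlb0] at hfb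
              rw [← hfb] at he
              exact hlb0 (he ▸ hkeepNS)
          · rintro (⟨_, hbe⟩ | ⟨_, _, hex⟩ | ⟨hbe, _, _⟩ | ⟨hae, _, _⟩)
            · exact absurd hbe hbp
            · have hlb0 : lb0 ∈ NS := hchain.2 hex
              rw [if_pos hlb0] at hfb
              rw [hfb]
            · exact absurd hbe hbp
            · exact absurd rfl hae
        · subst hbp
          rw [hGp] at hb
          have hlb : lb = keep := (Option.some.inj hb).symm
          subst hlb
          rw [hGold a hap] at ha
          obtain ⟨la0, ha0, hfa⟩ := Option.map_eq_some_iff.1 ha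
          have hchain := hlab a la0 ha0
          constructor
          · intro he
            by_cases hla0 : la0 ∈ NS
            · exact Or.inr (Or.inr (Or.inl ⟨rfl, hap, hchain.1 hla0⟩))
            · exfalso
              rw [if_neg hla0] at hfa
              rw [← hfa] at he
              exact hla0 (he.symm ▸ hkeepNS)
          · rintro (⟨hae, _⟩ | ⟨hae, _, _⟩ | ⟨_, _, hex⟩ | ⟨_, hbe, _⟩)
            · exact absurd hae hap
            · exact absurd hae hap
            · have hla0 : la0 ∈ NS := hchain.2 hex
              rw [if_pos hla0] at hfa
              rw [hfa]
            · exact absurd rfl hbe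
        · rw [hGold a hap] at ha
          rw [hGold b hbp] at hb
          obtain ⟨la0, ha0, hfa⟩ := Option.map_eq_some_iff.1 ha
          obtain ⟨lb0, hb0, hfb⟩ := Option.map_eq_some_iff.1 hb
          have hchA := hlab a la0 ha0
          have hchB := hlab b lb0 hb0
          have hiff := h2 a b la0 lb0 ha0 hb0
          by_cases hA : la0 ∈ NS <;> by_cases hB : lb0 ∈ NS
          · rw [if_pos hA] at hfa
            rw [if_pos hB] at hfb
            refine iff_of_true (by rw [← hfa, ← hfb]) ?_
            exact Or.inr (Or.inr (Or.inr ⟨hap, hbp, Or.inr ⟨hchA.1 hA, hchB.1 hB⟩⟩))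
          · rw [if_pos hA] at hfa
            rw [if_neg hB] at hfb
            refine iff_of_false ?_ ?_
            · intro he
              rw [← hfa, ← hfb] at he
              exact hB (he ▸ hkeepNS)
            · rintro (⟨hae, _⟩ | ⟨hae, _, _⟩ | ⟨hbe, _, _⟩ | ⟨_, _, hc | ⟨_, hexB⟩⟩)
              · exact absurd hae hap
              · exact absurd hae hap
              · exact absurd hbe hbp
              · have : la0 = lb0 := hiff.2 hc
                exact hB (this ▸ hA)
              · exact hB (hchB.2 hexB)
          · rw [if_neg hA] at hfa
            rw [if_pos hB] at hfb
            refine iff_of_false ?_ ?_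
            · intro he
              rw [← hfa, ← hfb] at he
              exact hA (he.symm ▸ hkeepNS)
            · rintro (⟨hae, _⟩ | ⟨hae, _, _⟩ | ⟨hbe, _, _⟩ | ⟨_, _, hc | ⟨hexA, _⟩⟩)
              · exact absurd hae hap
              · exact absurd hae hap
              · exact absurd hbe hbp
              · have : la0 = lb0 := hiff.2 hc
                exact hA (this ▸ hB)
              · exact hA (hchA.2 hexA)
          · rw [if_neg hA] at hfa
            rw [if_neg hB] at hfb
            rw [← hfa, ← hfb]
            constructor
            · intro he
              exact Or.inr (Or.inr (Or.inr ⟨hap, hbp, Or.inl (hiff.1 he)⟩))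
            · rintro (⟨hae, _⟩ | ⟨hae, _, _⟩ | ⟨hbe, _, _⟩ | ⟨_, _, hc | ⟨hexA, _⟩⟩)
              · exact absurd hae hap
              · exact absurd hae hap
              · exact absurd hbe hbp
              · exact hiff.2 hc
              · exact absurd (hchA.2 hexA) hA
      · intro q l hq
        by_cases hqp : q = p
        · subst hqp
          rw [hGp] at hq
          have : l = keep := (Option.some.inj hq).symm
          subst this
          simp only
          omega
        · rw [hGold q hqp] at hq
          obtain ⟨l0, h0, hf⟩ := Option.map_eq_some_iff.1 hq
          have hb := h3 q l0 h0
          by_cases hl0 : l0 ∈ NS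
          · rw [if_pos hl0] at hf
            rw [← hf]
            simp only
            omega
          · rw [if_neg hl0] at hf
            rw [← hf]
            simp only
            omega

theorem bPass1_inv_aux (grid : List (List String)) : ∀ (cells P : List (Int × Int))
    (st : PySem.Dict (Int × Int) Int × Int),
    pvCells grid = P ++ cells → InvB grid P st →
    InvB grid (P ++ cells)
      (cells.foldl (fun st p =>
        if pvLookup grid p.1 p.2 ≠ "village" then st
        else
          let ns := ([(p.1 - 1, p.2), (p.1, p.2 - 1)] : List (Int × Int)).filterMap
            (fun q => PySem.Dict.get? st.1 q)
          if ns = [] then (PySem.Dict.insert st.1 p st.2, st.2 + 1)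
          else
            let keep := (PySem.List.min? ns (fun x => x)).getD 0
            let d := PySem.Dict.insert st.1 p keep
            ((PySem.Dict.keys d).foldl
                (fun d q => if PySem.Dict.getD d q 0 ∈ ns then PySem.Dict.insert d q keep else d) d,
              st.2)) st) := by
  intro cells
  induction cells with
  | nil => intro P st _ h; simpa using h
  | cons c cells ih =>
    intro P st hdec hInv
    have h1 := bPass1_step grid P cells c st hdec hInv
    have h2 := ih (P ++ [c]) _ (by rw [hdec]; simp) h1
    rw [List.append_assoc] at h2
    simpa using h2

theorem bPass1_inv (grid : List (List String)) :
    InvB grid (pvCells grid) (bPass1 grid) := by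
  have h := bPass1_inv_aux grid (pvCells grid) [] (PySem.Dict.empty, 0) (by simp) ?_
  · simpa [bPass1] using h
  · refine ⟨?_, ?_, ?_, ?_, le_refl 0⟩
    · intro q
      simp [PySem.Dict.get?_empty]
    · intro a b la lb ha _
      rw [PySem.Dict.get?_empty] at ha
      cases ha
    · intro q l hq
      rw [PySem.Dict.get?_empty] at hq
      cases hq
    · simp [PySem.Dict.keys_empty]

-- ================== terrain-type sets ==================
def TypeAt (grid : List (List String)) (p : Int × Int) (t : String) : Prop :=
  ∃ q, Nbr p q ∧ pvInB grid q = true ∧ pvTerrains.contains (pvLookup grid q.1 q.2) = true ∧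
    pvLookup grid q.1 q.2 = t

theorem typefold_mem (grid : List (List String)) :
    ∀ (L : List (Int × Int)) (s : PySem.Set String) (t : String),
    (t ∈ L.foldl (fun s q =>
        if pvInB grid q then
          if pvTerrains.contains (pvLookup grid q.1 q.2) then PySem.Set.add s (pvLookup grid q.1 q.2)
          else s
        else s) s ↔
      t ∈ s ∨ ∃ q ∈ L, pvInB grid q = true ∧ pvTerrains.contains (pvLookup grid q.1 q.2) = true ∧
        pvLookup grid q.1 q.2 = t) := by
  intro L
  induction L with
  | nil => intro s t; simp
  | cons q L ih =>
    intro s t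
    simp only [List.foldl_cons]
    by_cases hin : pvInB grid q = true
    · rw [if_pos hin]
      by_cases hter : pvTerrains.contains (pvLookup grid q.1 q.2) = true
      · rw [if_pos hter, ih]
        rw [PySem.Set.mem_add]
        constructor
        · rintro ((hs | rfl) | ⟨q', hq', hrest⟩)
          · exact Or.inl hs
          · exact Or.inr ⟨q, List.mem_cons_self, hin, hter, rfl⟩
          · exact Or.inr ⟨q', List.mem_cons_of_mem q hq', hrest⟩
        · rintro (hs | ⟨q', hq', hrest⟩)
          · exact Or.inl (Or.inl hs)
          · rcases List.mem_cons.1 hq' with rfl | hq'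
            · exact Or.inl (Or.inr hrest.2.2.symm)
            · exact Or.inr ⟨q', hq', hrest⟩
      · rw [if_neg hter, ih]
        constructor
        · rintro (hs | ⟨q', hq', hrest⟩)
          · exact Or.inl hs
          · exact Or.inr ⟨q', List.mem_cons_of_mem q hq', hrest⟩
        · rintro (hs | ⟨q', hq', hrest⟩)
          · exact Or.inl hs
          · rcases List.mem_cons.1 hq' with rfl | hq'
            · exact absurd hrest.2.1 hter
            · exact Or.inr ⟨q', hq', hrest⟩
    · rw [if_neg hin, ih]
      constructor
      · rintro (hs | ⟨q', hq', hrest⟩)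
        · exact Or.inl hs
        · exact Or.inr ⟨q', List.mem_cons_of_mem q hq', hrest⟩
      · rintro (hs | ⟨q', hq', hrest⟩)
        · exact Or.inl hs
        · rcases List.mem_cons.1 hq' with rfl | hq'
          · exact absurd hrest.1 hin
          · exact Or.inr ⟨q', hq', hrest⟩

theorem typefold_nodup (grid : List (List String)) :
    ∀ (L : List (Int × Int)) (s : PySem.Set String), s.Nodup →
    (L.foldl (fun s q =>
        if pvInB grid q then
          if pvTerrains.contains (pvLookup grid q.1 q.2) then PySem.Set.add s (pvLookup grid q.1 q.2)
          else s
        else s) s).Nodup := by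
  intro L
  induction L with
  | nil => intro s h; exact h
  | cons q L ih =>
    intro s h
    simp only [List.foldl_cons]
    apply ih
    split
    · split
      · exact PySem.Set.nodup_add _ _ h
      · exact h
    · exact h

theorem nbrA_list_mem (p n : Int × Int) :
    n ∈ ([(p.1 + 1, p.2), (p.1 - 1, p.2), (p.1, p.2 + 1), (p.1, p.2 - 1)] : List (Int × Int)) ↔
      Nbr p n := by
  simp only [List.mem_cons, List.not_mem_nil, or_false, Nbr]

theorem nbrB_list_mem (p n : Int × Int) :
    n ∈ ([(p.1 - 1, p.2), (p.1 + 1, p.2), (p.1, p.2 - 1), (p.1, p.2 + 1)] : List (Int × Int)) ↔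
      Nbr p n := by
  simp only [List.mem_cons, List.not_mem_nil, or_false, Nbr]
  tauto

theorem clusterTypes_mem (grid : List (List String)) : ∀ (cl : List (Int × Int)) (t : String),
    (t ∈ clusterTypes grid cl ↔ ∃ p ∈ cl, TypeAt grid p t) := by
  have aux : ∀ (cl : List (Int × Int)) (s : PySem.Set String) (t : String),
      (t ∈ cl.foldl (fun s p =>
          ([(p.1 + 1, p.2), (p.1 - 1, p.2), (p.1, p.2 + 1), (p.1, p.2 - 1)] : List (Int × Int)).foldl
            (fun s q =>
              if pvInB grid q then
                if pvTerrains.contains (pvLookup grid q.1 q.2) then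
                  PySem.Set.add s (pvLookup grid q.1 q.2)
                else s
              else s) s) s ↔
        t ∈ s ∨ ∃ p ∈ cl, TypeAt grid p t) := by
    intro cl
    induction cl with
    | nil => intro s t; simp
    | cons p cl ih =>
      intro s t
      refine Iff.trans (ih _ t) ?_
      rw [typefold_mem]
      constructor
      · rintro ((hs | ⟨q, hq, hrest⟩) | ⟨p', hp', hT⟩)
        · exact Or.inl hs
        · exact Or.inr ⟨p, List.mem_cons_self, q, (nbrA_list_mem p q).1 hq, hrest⟩
        · exact Or.inr ⟨p', List.mem_cons_of_mem p hp', hT⟩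
      · rintro (hs | ⟨p', hp', hT⟩)
        · exact Or.inl (Or.inl hs)
        · rcases List.mem_cons.1 hp' with rfl | hp'
          · obtain ⟨q, hq, hrest⟩ := hT
            exact Or.inl (Or.inr ⟨q, (nbrA_list_mem p' q).2 hq, hrest⟩)
          · exact Or.inr ⟨p', hp', hT⟩
  intro cl t
  rw [clusterTypes, aux]
  simp [PySem.Set.empty]

theorem clusterTypes_nodup (grid : List (List String)) (cl : List (Int × Int)) :
    (clusterTypes grid cl).Nodup := by
  have aux : ∀ (cl : List (Int × Int)) (s : PySem.Set String), s.Nodup →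
      (cl.foldl (fun s p =>
          ([(p.1 + 1, p.2), (p.1 - 1, p.2), (p.1, p.2 + 1), (p.1, p.2 - 1)] : List (Int × Int)).foldl
            (fun s q =>
              if pvInB grid q then
                if pvTerrains.contains (pvLookup grid q.1 q.2) then
                  PySem.Set.add s (pvLookup grid q.1 q.2)
                else s
              else s) s) s).Nodup := by
    intro cl
    induction cl with
    | nil => intro s h; exact h
    | cons p cl ih =>
      intro s h
      exact ih _ (typefold_nodup grid _ s h)
  exact aux cl [] List.nodup_nil

theorem bTypes_mem (grid : List (List String)) (label : PySem.Dict (Int × Int) Int) (l : Int)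
    (t : String) :
    t ∈ bTypes grid label l ↔
      ∃ q ∈ PySem.Dict.keys label, PySem.Dict.getD label q 0 = l ∧ TypeAt grid q t := by
  have aux : ∀ (ks : List (Int × Int)) (s : PySem.Set String),
      (t ∈ ks.foldl (fun s q =>
          if PySem.Dict.getD label q 0 ≠ l then s
          else
            ([(q.1 - 1, q.2), (q.1 + 1, q.2), (q.1, q.2 - 1), (q.1, q.2 + 1)] : List (Int × Int)).foldl
              (fun s q' =>
                if pvInB grid q' then
                  if pvTerrains.contains (pvLookup grid q'.1 q'.2) then
                    PySem.Set.add s (pvLookup grid q'.1 q'.2)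
                  else s
                else s) s) s ↔
        t ∈ s ∨ ∃ q ∈ ks, PySem.Dict.getD label q 0 = l ∧ TypeAt grid q t) := by
    intro ks
    induction ks with
    | nil => intro s; simp
    | cons q ks ih =>
      intro s
      refine Iff.trans (ih _) ?_
      dsimp only
      by_cases hl : PySem.Dict.getD label q 0 = l
      · rw [if_neg (by simpa using hl), typefold_mem]
        constructor
        · rintro ((hs | ⟨q', hq', hrest⟩) | ⟨q', hq', hT⟩)
          · exact Or.inl hs
          · exact Or.inr ⟨q, List.mem_cons_self, hl, q', (nbrB_list_mem q q').1 hq', hrest⟩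
          · exact Or.inr ⟨q', List.mem_cons_of_mem q hq', hT⟩
        · rintro (hs | ⟨q', hq', hT⟩)
          · exact Or.inl (Or.inl hs)
          · rcases List.mem_cons.1 hq' with rfl | hq'
            · obtain ⟨q'', hq'', hrest⟩ := hT.2
              exact Or.inl (Or.inr ⟨q'', (nbrB_list_mem q' q'').2 hq'', hrest⟩)
            · exact Or.inr ⟨q', hq', hT⟩
      · rw [if_pos (by simpa using hl)]
        constructor
        · rintro (hs | ⟨q', hq', hT⟩)
          · exact Or.inl hs
          · exact Or.inr ⟨q', List.mem_cons_of_mem q hq', hT⟩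
        · rintro (hs | ⟨q', hq', hT⟩)
          · exact Or.inl hs
          · rcases List.mem_cons.1 hq' with rfl | hq'
            · exact absurd hT.1 hl
            · exact Or.inr ⟨q', hq', hT⟩
  rw [bTypes, aux]
  simp [PySem.Set.empty]

theorem bTypes_nodup (grid : List (List String)) (label : PySem.Dict (Int × Int) Int) (l : Int) :
    (bTypes grid label l).Nodup := by
  have aux : ∀ (ks : List (Int × Int)) (s : PySem.Set String), s.Nodup →
      (ks.foldl (fun s q =>
          if PySem.Dict.getD label q 0 ≠ l then s
          else
            ([(q.1 - 1, q.2), (q.1 + 1, q.2), (q.1, q.2 - 1), (q.1, q.2 + 1)] : List (Int × Int)).foldl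
              (fun s q' =>
                if pvInB grid q' then
                  if pvTerrains.contains (pvLookup grid q'.1 q'.2) then
                    PySem.Set.add s (pvLookup grid q'.1 q'.2)
                  else s
                else s) s) s).Nodup := by
    intro ks
    induction ks with
    | nil => intro s h; exact h
    | cons q ks ih =>
      intro s h
      refine ih _ ?_
      dsimp only
      split
      · exact h
      · exact typefold_nodup grid _ s h
  exact aux _ [] List.nodup_nil

theorem bLabs_eq (label : PySem.Dict (Int × Int) Int) :
    bLabs label = PySem.Set.ofList
      ((PySem.Dict.keys label).map (fun q => PySem.Dict.getD label q 0)) := by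
  rw [bLabs]
  have hfun : (fun (labs : List Int) (q : Int × Int) =>
      if PySem.Dict.getD label q 0 ∈ labs then labs else labs ++ [PySem.Dict.getD label q 0]) =
      (fun (labs : PySem.Set Int) (q : Int × Int) =>
        PySem.Set.add labs (PySem.Dict.getD label q 0)) := by
    funext labs q
    rw [PySem.Set.add_eq_ite]
  rw [hfun, ← PySem.Set.update_map_eq_foldl_add, PySem.Set.update_nil_left]

theorem pv_foldl_count {α : Type} (L : List α) (P : α → Prop) [DecidablePred P] :
    L.foldl (fun (c : Int) x => if P x then c + 1 else c) 0 =
      (L.countP (fun x => decide (P x)) : Int) := by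
  have hfun : (fun (c : Int) (x : α) => if P x then c + 1 else c) =
      (fun (c : Int) (x : α) => if (fun x => decide (P x)) x = true then c + 1 else c) := by
    funext c x
    by_cases h : P x <;> simp [h]
  rw [hfun, PySem.List.foldl_count_if (fun x => decide (P x)) L 0]
  omega

theorem pv_countP_forall₂ {α β : Type} (R : α → β → Prop) (p : α → Bool) (q : β → Bool) :
    ∀ (l1 : List α) (l2 : List β), List.Forall₂ R l1 l2 →
    (∀ a b, a ∈ l1 → R a b → p a = q b) → l1.countP p = l2.countP q := by
  intro l1 l2 h
  induction h with
  | nil => intro _; rfl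
  | cons hab hrest ih =>
    intro hpt
    rename_i a b l1' l2'
    rw [List.countP_cons, List.countP_cons]
    rw [ih (fun a' b' ha' hr => hpt a' b' (List.mem_cons_of_mem a ha') hr)]
    rw [hpt a b List.mem_cons_self hab]

theorem pv_main (grid : List (List String)) : greengoldPlains grid = greengoldPlains_alt grid := by
  obtain ⟨reps, hchar, hvill, hpair, hfa, hscan⟩ := outerA_inv grid
  obtain ⟨b1, b2, b3, b4, b5⟩ := bPass1_inv grid
  have hkeysmem : ∀ q, q ∈ PySem.Dict.keys (bPass1 grid).1 ↔ Vill grid q := by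
    intro q
    rw [← PySem.Dict.contains_iff_mem_keys, PySem.Dict.contains_eq_isSome_get?, b1 q]
    constructor
    · exact fun h => h.1
    · exact fun h => ⟨h, (pvCells_mem grid q).2 h.1⟩
  have hfv : ∀ q, Vill grid q →
      PySem.Dict.get? (bPass1 grid).1 q = some (PySem.Dict.getD (bPass1 grid).1 q 0) := by
    intro q hv
    obtain ⟨l, hl⟩ := Option.isSome_iff_exists.1 ((b1 q).2 ⟨hv, (pvCells_mem grid q).2 hv.1⟩)
    rw [hl, PySem.Dict.getD_eq_get?_getD, hl]
    rfl
  have hconn_iff : ∀ a b, Vill grid a → Vill grid b →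
      (PySem.Dict.getD (bPass1 grid).1 a 0 = PySem.Dict.getD (bPass1 grid).1 b 0 ↔
        Conn grid a b) := by
    intro a b ha hb
    rw [b2 a b _ _ (hfv a ha) (hfv b hb), connP_full]
  have hcover : ∀ q, Vill grid q → ∃ r ∈ reps, Conn grid r q := by
    intro q hv
    have hqV := hscan q ((pvCells_mem grid q).2 hv.1) hv
    obtain ⟨_, r, hr, hc⟩ := (hchar q).1 hqV
    exact ⟨r, hr, hc⟩
  have htypes : ∀ r cl, r ∈ reps → (∀ q, q ∈ cl ↔ Vill grid q ∧ Conn grid r q) →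
      (clusterTypes grid cl).length =
        (bTypes grid (bPass1 grid).1 (PySem.Dict.getD (bPass1 grid).1 r 0)).length := by
    intro r cl hr hcl
    have hVr : Vill grid r := hvill r hr
    have hmemiff : ∀ t, t ∈ clusterTypes grid cl ↔
        t ∈ bTypes grid (bPass1 grid).1 (PySem.Dict.getD (bPass1 grid).1 r 0) := by
      intro t
      rw [clusterTypes_mem, bTypes_mem]
      constructor
      · rintro ⟨p, hp, hT⟩
        obtain ⟨hVp, hconn⟩ := (hcl p).1 hp
        exact ⟨p, (hkeysmem p).2 hVp,
          (hconn_iff p r hVp hVr).2 (conn_symm grid hconn), hT⟩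
      · rintro ⟨q, hq, hfq, hT⟩
        have hVq := (hkeysmem q).1 hq
        have hconn : Conn grid q r := (hconn_iff q r hVq hVr).1 hfq
        exact ⟨q, (hcl q).2 ⟨hVq, conn_symm grid hconn⟩, hT⟩
    exact List.Perm.length_eq
      ((List.perm_ext_iff_of_nodup (clusterTypes_nodup grid cl)
        (bTypes_nodup grid (bPass1 grid).1 _)).2 hmemiff)
  rw [greengoldPlains, greengoldPlains_alt]
  rw [pv_foldl_count ((outerA grid).2) (fun cluster => 3 ≤ (clusterTypes grid cluster).length)]
  rw [pv_foldl_count (bLabs (bPass1 grid).1)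
    (fun l => 3 ≤ (bTypes grid (bPass1 grid).1 l).length)]
  have hcount : (outerA grid).2.countP
      (fun cl => decide (3 ≤ (clusterTypes grid cl).length)) =
      (bLabs (bPass1 grid).1).countP
      (fun l => decide (3 ≤ (bTypes grid (bPass1 grid).1 l).length)) := by
    have step1 : reps.countP
        (fun r => decide (3 ≤ (bTypes grid (bPass1 grid).1
          (PySem.Dict.getD (bPass1 grid).1 r 0)).length)) =
        (outerA grid).2.countP (fun cl => decide (3 ≤ (clusterTypes grid cl).length)) := by
      apply pv_countP_forall₂ _ _ _ reps (outerA grid).2 hfa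
      intro r cl hr hR
      rw [htypes r cl hr hR]
    rw [← step1]
    have step2 : reps.countP
        (fun r => decide (3 ≤ (bTypes grid (bPass1 grid).1
          (PySem.Dict.getD (bPass1 grid).1 r 0)).length)) =
        (reps.map (fun r => PySem.Dict.getD (bPass1 grid).1 r 0)).countP
        (fun l => decide (3 ≤ (bTypes grid (bPass1 grid).1 l).length)) := by
      rw [List.countP_map]
      rfl
    rw [step2]
    apply List.Perm.countP_eq
    have hnodup1 : (reps.map (fun r => PySem.Dict.getD (bPass1 grid).1 r 0)).Nodup := by
      rw [List.Nodup, List.pairwise_map]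
      refine List.Pairwise.imp_of_mem ?_ hpair
      intro a b ha hb hnc heq
      exact hnc ((hconn_iff a b (hvill a ha) (hvill b hb)).1 heq)
    have hnodup2 : (bLabs (bPass1 grid).1).Nodup := by
      rw [bLabs_eq]
      exact PySem.Set.nodup_ofList _
    refine (List.perm_ext_iff_of_nodup hnodup1 hnodup2).2 ?_
    intro l
    rw [List.mem_map, bLabs_eq, PySem.Set.mem_ofList, List.mem_map]
    constructor
    · rintro ⟨r, hr, rfl⟩
      exact ⟨r, (hkeysmem r).2 (hvill r hr), rfl⟩
    · rintro ⟨q, hq, rfl⟩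
      have hVq := (hkeysmem q).1 hq
      obtain ⟨r, hr, hconn⟩ := hcover q hVq
      exact ⟨r, hr, (hconn_iff r q (hvill r hr) hVq).2 hconn⟩
  rw [hcount]
  ring

-- ===== VERDICT (by name: the statement is the Claim_ definition above) =====
theorem greengoldPlains_spec : Claim_equal_greengoldPlains := by
  intro grid _ _
  show greengoldPlains grid = greengoldPlains_alt grid
  exact pv_main grid
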